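-- pv_equiv track=rewrite | github.com/bysse/advent-of-code | 2024/python/day21/day21.py | find_dpad_seq
-- ===== SOURCE A (Python) =====
-- from collections import deque, defaultdict
--
-- dpad_mapping = {
--     'X': (0, 0), '^': (1, 0), 'A': (2, 0),
--     '<': (0, -1), 'v': (1, -1), '>': (2, -1),
-- }
--
-- def movement_calculator(key_map, a, b):
--     x0, y0 = key_map[a]
--     x1, y1 = key_map[b]
--     if x0 == x1 and y0 == y1:
--         return [[]]
--     if x0 == x1:
--         return [[(0, y1 - y0)]]
--     if y0 == y1:
--         return [[(x1 - x0, 0)]]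
--
--     seq = []
--     if (x1, y0) != (0, 0):
--         seq.append([(x1 - x0, 0), (0, y1 - y0)])
--     if (x0, y1) != (0, 0):
--         seq.append([(0, y1 - y0), (x1 - x0, 0)])
--     return seq
--
-- def translate(directions):
--     seq = []
--     for dx, dy, in directions:
--         if dx == 0 and dy == 0:
--             raise ValueError("Invalid direction")
--         if dx == 0:
--             seq.append(abs(dy) * ('^' if dy > 0 else 'v'))
--         else:
--             seq.append(abs(dx) * ('>' if dx > 0 else '<'))
--     seq.append('A')
--     return seq
--
-- def single_sequence(sequence):
--     new_sequence = ""
--     last_key = 'A'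
--     for i in range(len(sequence)):
--         movements = movement_calculator(dpad_mapping, last_key, sequence[i])
--         last_key = sequence[i]
--         new_sequence += "".join(translate(movements[0]))
--     return new_sequence
--
-- def split(s):
--     last = 0
--     idx = s.find('A')
--     while idx >= 0:
--         yield s[last:idx] + 'A'
--         last = idx + 1
--         idx = s.find('A', last)
--
-- def split_sequence(sequence):
--     new_state = defaultdict(int)
--     for part in split(sequence):
--         new_state[part] += 1
--     return new_state
--
-- def calculate_length(state):
--     return sum([len(k) * v for k, v in state.items()])
--
-- def find_dpad_seq(sequence, count):
--     sequence_map = split_sequence(sequence)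
--     for i in range(count):
--         new_state = defaultdict(int)
--         for seq, multiple in sequence_map.items():
--             new_seq = single_sequence(seq)
--             for part, part_count in split_sequence(new_seq).items():
--                 new_state[part] += part_count * multiple
--         sequence_map = new_state
--
--     return calculate_length(sequence_map)
-- ===== SOURCE B (Python) =====
-- from collections import Counter
--
-- # Fixed d-pad geometry: the key-press block emitted when a robot arm moves
-- # from key x to key y and presses it (x-moves-first unless that passes the gap).
-- BLOCKS = {
--     ('X', 'X'): 'A',   ('X', '^'): '>A',   ('X', 'A'): '>>A',
--     ('X', '<'): 'vA',  ('X', 'v'): '>vA',  ('X', '>'): '>>vA',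
--     ('^', 'X'): '<A',  ('^', '^'): 'A',    ('^', 'A'): '>A',
--     ('^', '<'): 'v<A', ('^', 'v'): 'vA',   ('^', '>'): '>vA',
--     ('A', 'X'): '<<A', ('A', '^'): '<A',   ('A', 'A'): 'A',
--     ('A', '<'): 'v<<A', ('A', 'v'): '<vA', ('A', '>'): 'vA',
--     ('<', 'X'): '^A',  ('<', '^'): '>^A',  ('<', 'A'): '>>^A',
--     ('<', '<'): 'A',   ('<', 'v'): '>A',   ('<', '>'): '>>A',
--     ('v', 'X'): '<^A', ('v', '^'): '^A',   ('v', 'A'): '>^A',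
--     ('v', '<'): '<A',  ('v', 'v'): 'A',    ('v', '>'): '>A',
--     ('>', 'X'): '<<^A', ('>', '^'): '<^A', ('>', 'A'): '^A',
--     ('>', '<'): '<<A', ('>', 'v'): '<A',   ('>', '>'): 'A',
-- }
--
-- def find_dpad_seq(sequence, count):
--     # Count the consecutive key pairs (prefixed with the arm's start key 'A')
--     # of the input up to its last 'A' (characters after it are never pressed).
--     cut = sequence.rfind('A')
--     if count <= 0:
--         # depth 0: the answer is just the length of that prefix
--         return cut + 1
--     s = sequence[:cut + 1]
--     pairs = Counter(zip('A' + s, s))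
--     # Each layer rewrites every pair into the pairs of its fixed move block.
--     for _ in range(count):
--         nxt = Counter()
--         for (x, y), c in pairs.items():
--             b = BLOCKS[(x, y)]
--             p = 'A'
--             for q in b:
--                 nxt[(p, q)] += c
--                 p = q
--         pairs = nxt
--     # The sequence length equals the number of consecutive pairs.
--     return sum(pairs.values())
-- ===== Notes on version B (the rewrite author's own statement) =====
-- stated objective: alternative
-- what changed: A's per-layer rebuild of a segment-count dict, re-deriving each segment's expansion string via movement_calculator/translate every layer, is replaced by a counter of consecutive key pairs driven by a hard-coded 36-entry move-block table of the fixed d-pad (each layer is a constant-size table update, and the final length is the total pair count); it trades A's string re-expansion per layer for the one-off cost of counting the input's key pairs.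
import Mathlib
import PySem

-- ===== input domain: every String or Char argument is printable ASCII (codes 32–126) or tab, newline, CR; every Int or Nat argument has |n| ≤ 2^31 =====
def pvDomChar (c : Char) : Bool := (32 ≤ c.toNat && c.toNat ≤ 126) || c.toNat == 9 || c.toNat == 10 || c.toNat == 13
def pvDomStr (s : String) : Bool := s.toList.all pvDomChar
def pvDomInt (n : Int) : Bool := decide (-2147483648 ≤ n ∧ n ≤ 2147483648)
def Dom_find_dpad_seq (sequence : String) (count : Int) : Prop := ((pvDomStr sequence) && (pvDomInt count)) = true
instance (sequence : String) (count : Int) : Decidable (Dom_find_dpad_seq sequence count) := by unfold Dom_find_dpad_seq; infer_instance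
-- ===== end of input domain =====

-- B replaces A's per-layer rebuild of a segment-count dict (re-deriving each segment's
-- expansion string every layer) by a counter of consecutive key PAIRS driven by the
-- fixed 36-entry move-block table of the d-pad; the final length is the pair count.

-- ===== PORT A =====

-- dpad_mapping[c]; unmapped chars raise KeyError in Python (excluded by Pre_),
-- the default (0, 0) is never consulted inside Pre_.
def dpadPos (c : Char) : Int × Int :=
  if c = 'X' then (0, 0) else if c = '^' then (1, 0) else if c = 'A' then (2, 0)
  else if c = '<' then (0, -1) else if c = 'v' then (1, -1) else if c = '>' then (2, -1)
  else (0, 0)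

def movement_calculator (a b : Char) : List (List (Int × Int)) :=
  let p0 := dpadPos a
  let p1 := dpadPos b
  if p0.1 = p1.1 ∧ p0.2 = p1.2 then [[]]
  else if p0.1 = p1.1 then [[(0, p1.2 - p0.2)]]
  else if p0.2 = p1.2 then [[(p1.1 - p0.1, 0)]]
  else
    (if (p1.1, p0.2) ≠ ((0 : Int), (0 : Int)) then [[(p1.1 - p0.1, 0), (0, p1.2 - p0.2)]] else []) ++
    (if (p0.1, p1.2) ≠ ((0 : Int), (0 : Int)) then [[(0, p1.2 - p0.2), (p1.1 - p0.1, 0)]] else [])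

-- translate: the (0,0) branch raises ValueError in Python; movement_calculator
-- never produces a (0,0) direction, so that branch is dead ([] stands for it).
def translateDirs (directions : List (Int × Int)) : List Char :=
  (directions.map (fun d =>
    if d.1 = 0 ∧ d.2 = 0 then []
    else if d.1 = 0 then List.replicate d.2.natAbs (if d.2 > 0 then '^' else 'v')
    else List.replicate d.1.natAbs (if d.1 > 0 then '>' else '<'))).flatten ++ ['A']

-- single_sequence: fold over the sequence keeping (built string, last key);
-- movements[0] is headD [] (movement_calculator never returns []).
def single_sequence (seq : List Char) : List Char :=
  (seq.foldl (fun (st : List Char × Char) c =>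
      (st.1 ++ translateDirs ((movement_calculator st.2 c).headD []), c)) ([], 'A')).1

-- split: the find-'A' loop, as a scan emitting each 'A'-terminated part
-- (the remainder after the last 'A' is dropped, as in Python).
def splitGo : List Char → List Char → List (List Char)
  | [], _ => []
  | c :: rest, acc =>
      if c = 'A' then (acc ++ ['A']) :: splitGo rest [] else splitGo rest (acc ++ [c])

def splitA (s : List Char) : List (List Char) := splitGo s []

-- split_sequence: defaultdict(int) counting loop = PySem.Dict.counter
def split_sequence (s : List Char) : PySem.Dict (List Char) Int :=
  PySem.Dict.counter (splitA s)

def calculate_length (d : PySem.Dict (List Char) Int) : Int :=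
  (d.items.map (fun p => (p.1.length : Int) * p.2)).sum

def find_dpad_seq (sequence : String) (count : Int) : Int :=
  let final :=
    (PySem.List.pyRange 0 count 1).foldl (fun m _ =>
      m.items.foldl (fun ns p =>
        (split_sequence (single_sequence p.1)).items.foldl
          (fun ns2 q => ns2.modify q.1 0 (· + q.2 * p.2)) ns)
        PySem.Dict.empty)
      (split_sequence sequence.toList)
  calculate_length final

-- ===== PORT B =====
-- Source B: per-pair counting over the hard-coded move-block table BLOCKS.

-- BLOCKS[(x, y)]; a pair outside the table raises KeyError in Python
-- (excluded by Pre_), the default [] is never consulted inside Pre_.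
def pairBlock (x y : Char) : List Char :=
  match x, y with
  | 'X', 'X' => ['A']
  | 'X', '^' => ['>', 'A']
  | 'X', 'A' => ['>', '>', 'A']
  | 'X', '<' => ['v', 'A']
  | 'X', 'v' => ['>', 'v', 'A']
  | 'X', '>' => ['>', '>', 'v', 'A']
  | '^', 'X' => ['<', 'A']
  | '^', '^' => ['A']
  | '^', 'A' => ['>', 'A']
  | '^', '<' => ['v', '<', 'A']
  | '^', 'v' => ['v', 'A']
  | '^', '>' => ['>', 'v', 'A']
  | 'A', 'X' => ['<', '<', 'A']
  | 'A', '^' => ['<', 'A']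
  | 'A', 'A' => ['A']
  | 'A', '<' => ['v', '<', '<', 'A']
  | 'A', 'v' => ['<', 'v', 'A']
  | 'A', '>' => ['v', 'A']
  | '<', 'X' => ['^', 'A']
  | '<', '^' => ['>', '^', 'A']
  | '<', 'A' => ['>', '>', '^', 'A']
  | '<', '<' => ['A']
  | '<', 'v' => ['>', 'A']
  | '<', '>' => ['>', '>', 'A']
  | 'v', 'X' => ['<', '^', 'A']
  | 'v', '^' => ['^', 'A']
  | 'v', 'A' => ['>', '^', 'A']
  | 'v', '<' => ['<', 'A']
  | 'v', 'v' => ['A']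
  | 'v', '>' => ['>', 'A']
  | '>', 'X' => ['<', '<', '^', 'A']
  | '>', '^' => ['<', '^', 'A']
  | '>', 'A' => ['^', 'A']
  | '>', '<' => ['<', '<', 'A']
  | '>', 'v' => ['<', 'A']
  | '>', '>' => ['A']
  | _, _ => []

-- inner "p = 'A'; for q in b" walk of Source B, producing the pairs of a block
def blockPairsGo : Char → List Char → List (Char × Char)
  | _, [] => []
  | p, q :: rest => (p, q) :: blockPairsGo q rest

-- one layer of Source B's loop: rewrite every counted pair into its block's pairs
def stepP (m : PySem.Dict (Char × Char) Int) : PySem.Dict (Char × Char) Int :=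
  m.items.foldl (fun nxt p =>
    (blockPairsGo 'A' (pairBlock p.1.1 p.1.2)).foldl
      (fun nxt2 xy => nxt2.modify xy 0 (· + p.2)) nxt)
    PySem.Dict.empty

def find_dpad_seq_alt (sequence : String) (count : Int) : Int :=
  let cut := PySem.Chars.rfind sequence.toList ['A']
  if count ≤ 0 then cut + 1
  else
    let s := PySem.List.slice sequence.toList none (some (cut + 1))
    let pairs0 := PySem.Dict.counter (List.zip ('A' :: s) s)
    let final := (PySem.List.pyRange 0 count 1).foldl (fun m _ => stepP m) pairs0
    (final.items.map (fun p => p.2)).sum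

-- ===== PRECONDITION & SPEC =====
-- Pre_ excludes exactly the inputs where A raises KeyError: count ≥ 1 together
-- with a character outside the dpad keys somewhere up to the last 'A'
-- (characters after the last 'A' are dropped by split and never looked up).
def Pre_find_dpad_seq (sequence : String) (count : Int) : Prop :=
  count ≤ 0 ∨ ∀ i (h : i < sequence.toList.length), 'A' ∈ sequence.toList.drop i →
    (sequence.toList[i] = 'X' ∨ sequence.toList[i] = '^' ∨ sequence.toList[i] = 'A' ∨
     sequence.toList[i] = '<' ∨ sequence.toList[i] = 'v' ∨ sequence.toList[i] = '>')

instance (sequence : String) (count : Int) : Decidable (Pre_find_dpad_seq sequence count) := by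
  unfold Pre_find_dpad_seq; infer_instance

def pvWitness_find_dpad_seq : String × Int := ("<A^Av<A", 3)

def Spec_find_dpad_seq (sequence : String) (count : Int) (out : Int) : Prop :=
  out = find_dpad_seq_alt sequence count
instance (sequence : String) (count : Int) (out : Int) : Decidable (Spec_find_dpad_seq sequence count out) := by
  unfold Spec_find_dpad_seq; infer_instance

-- ===== CLAIM (what is proved, stated in full; the proofs are below) =====
def Claim_equal_find_dpad_seq : Prop := ∀ (sequence : String) (count : Int), Dom_find_dpad_seq sequence count → Pre_find_dpad_seq sequence count → Spec_find_dpad_seq sequence count (find_dpad_seq sequence count)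

-- ===== LEMMAS AND PROOFS =====

-- pure specification of A's layer recurrence on a segment
def segLen (seg : List Char) : Nat → Int
  | 0 => (seg.length : Int)
  | n+1 => ((splitA (single_sequence seg)).map (fun p => segLen p n)).sum

-- weighted sum of a count dict, over its keys (generic key type)
def Wk {κ : Type} [BEq κ] [LawfulBEq κ] (f : κ → Int) (d : PySem.Dict κ Int) : Int :=
  (d.keys.map (fun k => f k * d.getD k 0)).sum

-- one layer of A's loop
def stepA (m : PySem.Dict (List Char) Int) : PySem.Dict (List Char) Int :=
  m.items.foldl (fun ns p =>
    (split_sequence (single_sequence p.1)).items.foldl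
      (fun ns2 q => ns2.modify q.1 0 (· + q.2 * p.2)) ns)
    PySem.Dict.empty

lemma foldl_const_iterate {α β : Type} (l : List α) (F : β → β) (b : β) :
    l.foldl (fun m _ => F m) b = F^[l.length] b := by
  induction l generalizing b with
  | nil => rfl
  | cons x xs ih => simp [List.foldl, ih, Function.iterate_succ_apply]

lemma find_eq_iter (s : String) (c : Int) :
    find_dpad_seq s c = calculate_length (stepA^[c.toNat] (split_sequence s.toList)) := by
  show calculate_length ((PySem.List.pyRange 0 c 1).foldl (fun m _ => stepA m)
        (split_sequence s.toList)) = _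
  rw [foldl_const_iterate, PySem.List.length_pyRange_one]
  norm_num

lemma sum_map_sub {κ : Type} (l : List κ) (g g' : κ → Int) (k : κ)
    (hnd : l.Nodup) (hk : k ∈ l) (h : ∀ x ∈ l, x ≠ k → g' x = g x) :
    (l.map g').sum = (l.map g).sum + (g' k - g k) := by
  induction l with
  | nil => cases hk
  | cons x xs ih =>
    rcases List.mem_cons.1 hk with rfl | hk'
    · have : ∀ y ∈ xs, g' y = g y := fun y hy =>
        h y (List.mem_cons_of_mem _ hy) (fun e => ((List.nodup_cons.1 hnd).1 (e ▸ hy)))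
      simp [List.map_cons, List.map_congr_left this]
      ring
    · have hx : g' x = g x := h x List.mem_cons_self
        (fun e => ((List.nodup_cons.1 hnd).1 (e ▸ hk')))
      have := ih (List.nodup_cons.1 hnd).2 hk' (fun y hy => h y (List.mem_cons_of_mem _ hy))
      simp [List.map_cons, this, hx]
      ring

lemma Wk_modify {κ : Type} [BEq κ] [LawfulBEq κ] [DecidableEq κ]
    (f : κ → Int) (d : PySem.Dict κ Int)
    (k : κ) (c : Int) (h : d.keys.Nodup) :
    (d.modify k 0 (· + c)).keys.Nodup ∧
      Wk f (d.modify k 0 (· + c)) = Wk f d + f k * c := by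
  by_cases hc : d.contains k = true
  · have hkeys : (d.modify k 0 (· + c)).keys = d.keys := by
      rw [PySem.Dict.keys_modify, PySem.Dict.keys_insert_of_contains _ _ hc]
    refine ⟨hkeys ▸ h, ?_⟩
    have hmem : k ∈ d.keys := (PySem.Dict.contains_iff_mem_keys d k).1 hc
    unfold Wk
    rw [hkeys]
    rw [sum_map_sub d.keys (fun x => f x * d.getD x 0)
      (fun x => f x * (d.modify k 0 (· + c)).getD x 0) k h hmem
      (fun x _ hx => by simp only []; rw [PySem.Dict.getD_modify, if_neg hx])]
    rw [PySem.Dict.getD_modify, if_pos rfl]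
    ring
  · have hc' : d.contains k = false := by simpa using hc
    have hkeys : (d.modify k 0 (· + c)).keys = d.keys ++ [k] := by
      rw [PySem.Dict.keys_modify, PySem.Dict.keys_insert_of_not_contains _ _ hc']
    have hknot : k ∉ d.keys := fun hm =>
      by simp [(PySem.Dict.contains_iff_mem_keys d k).2 hm] at hc'
    refine ⟨hkeys ▸ (List.nodup_append.2 ⟨h, List.nodup_singleton k,
      fun a ha => by simpa using fun e : a = k => hknot (e ▸ ha)⟩), ?_⟩
    unfold Wk
    rw [hkeys, List.map_append, List.sum_append]
    have h1 : ∀ x ∈ d.keys, f x * (d.modify k 0 (· + c)).getD x 0 = f x * d.getD x 0 := by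
      intro x hx
      rw [PySem.Dict.getD_modify, if_neg (fun e : x = k => hknot (e ▸ hx))]
    rw [List.map_congr_left h1]
    simp [PySem.Dict.getD_modify, PySem.Dict.getD_of_not_contains d 0 hc']

-- a foldl of "modify key (+ weight)" adds the weighted sum (generic element type)
lemma Wk_foldl_modify {κ α : Type} [BEq κ] [LawfulBEq κ] [DecidableEq κ]
    (f : κ → Int) (key : α → κ) (g : α → Int)
    (l : List α) (d : PySem.Dict κ Int) (h : d.keys.Nodup) :
    (l.foldl (fun ns q => ns.modify (key q) 0 (· + g q)) d).keys.Nodup ∧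
      Wk f (l.foldl (fun ns q => ns.modify (key q) 0 (· + g q)) d) =
        Wk f d + (l.map (fun q => f (key q) * g q)).sum := by
  induction l generalizing d with
  | nil => simpa using h
  | cons q qs ih =>
    obtain ⟨hn, he⟩ := Wk_modify f d (key q) (g q) h
    obtain ⟨hn', he'⟩ := ih (d.modify (key q) 0 (· + g q)) hn
    refine ⟨hn', ?_⟩
    simp [List.foldl, he', he]
    ring

lemma counter_Wk {κ : Type} [BEq κ] [LawfulBEq κ] [DecidableEq κ]
    (f : κ → Int) (xs : List κ) :
    Wk f (PySem.Dict.counter xs) = (xs.map f).sum := by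
  induction xs using List.reverseRecOn with
  | nil => simp [PySem.Dict.counter, Wk, PySem.Dict.keys_empty]
  | append_singleton xs x ih =>
    rw [PySem.Dict.counter_append_singleton]
    have := (Wk_modify f (PySem.Dict.counter xs) x 1 (PySem.Dict.nodup_keys_counter xs)).2
    simp [this, ih]

lemma W_eq_Wk {κ : Type} [BEq κ] [LawfulBEq κ]
    (f : κ → Int) (d : PySem.Dict κ Int) (h : d.keys.Nodup) :
    (d.items.map (fun p => f p.1 * p.2)).sum = Wk f d := by
  rw [PySem.Dict.items_eq_map_keys d h 0]
  simp [Wk, List.map_map]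
  rfl

lemma innerSum (n : Nat) (p : List Char × Int) :
    ((split_sequence (single_sequence p.1)).items.map
      (fun q => segLen q.1 n * (q.2 * p.2))).sum = segLen p.1 (n+1) * p.2 := by
  have h1 : ∀ q : List Char × Int,
      segLen q.1 n * (q.2 * p.2) = (segLen q.1 n * q.2) * p.2 := fun q => by ring
  calc ((split_sequence (single_sequence p.1)).items.map
          (fun q => segLen q.1 n * (q.2 * p.2))).sum
      = ((split_sequence (single_sequence p.1)).items.map
          (fun q => (segLen q.1 n * q.2) * p.2)).sum := by
        exact congrArg List.sum (List.map_congr_left (fun q _ => h1 q))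
    _ = ((split_sequence (single_sequence p.1)).items.map
          (fun q => segLen q.1 n * q.2)).sum * p.2 := by
        exact List.sum_map_mul_right _ _ _
    _ = Wk (fun s => segLen s n) (split_sequence (single_sequence p.1)) * p.2 := by
        unfold split_sequence
        rw [W_eq_Wk (fun s => segLen s n) _ (PySem.Dict.nodup_keys_counter (splitA (single_sequence p.1)))]
    _ = segLen p.1 (n+1) * p.2 := by
        unfold split_sequence
        rw [counter_Wk]
        rfl

lemma stepA_aux (n : Nat) (l : List (List Char × Int))
    (ns : PySem.Dict (List Char) Int) (h : ns.keys.Nodup) :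
    (l.foldl (fun ns p =>
        (split_sequence (single_sequence p.1)).items.foldl
          (fun ns2 q => ns2.modify q.1 0 (· + q.2 * p.2)) ns) ns).keys.Nodup ∧
      Wk (fun s => segLen s n) (l.foldl (fun ns p =>
        (split_sequence (single_sequence p.1)).items.foldl
          (fun ns2 q => ns2.modify q.1 0 (· + q.2 * p.2)) ns) ns) =
      Wk (fun s => segLen s n) ns + (l.map (fun p => segLen p.1 (n+1) * p.2)).sum := by
  induction l generalizing ns with
  | nil => simpa using h
  | cons p ps ih =>
    obtain ⟨hn, he⟩ := Wk_foldl_modify (fun s => segLen s n) Prod.fst (fun q => q.2 * p.2)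
      (split_sequence (single_sequence p.1)).items ns h
    obtain ⟨hn', he'⟩ := ih _ hn
    refine ⟨hn', ?_⟩
    simp only [List.foldl_cons, List.map_cons, List.sum_cons]
    rw [he', he, innerSum]
    ring

lemma stepA_spec (n : Nat) (d : PySem.Dict (List Char) Int) (h : d.keys.Nodup) :
    (stepA d).keys.Nodup ∧
      Wk (fun s => segLen s n) (stepA d) = Wk (fun s => segLen s (n+1)) d := by
  obtain ⟨hn, he⟩ := stepA_aux n d.items PySem.Dict.empty (by simp [PySem.Dict.keys_empty])
  refine ⟨hn, ?_⟩
  unfold stepA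
  rw [he]
  have : Wk (fun s => segLen s n) PySem.Dict.empty = 0 := by
    simp [Wk, PySem.Dict.keys_empty]
  rw [this, zero_add]
  exact W_eq_Wk (fun s => segLen s (n+1)) d h

lemma calc_iter (n : Nat) (d : PySem.Dict (List Char) Int) (h : d.keys.Nodup) :
    calculate_length (stepA^[n] d) = Wk (fun s => segLen s n) d := by
  induction n generalizing d with
  | zero =>
    simpa [calculate_length, segLen] using W_eq_Wk (fun s : List Char => (s.length : Int)) d h
  | succ n ih =>
    obtain ⟨hn, he⟩ := stepA_spec n d h
    rw [Function.iterate_succ_apply, ih (stepA d) hn, he]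

-- ===== A-side: segment expansion splits into per-pair blocks =====

def pairsOf (s : List Char) : List (Char × Char) := List.zip ('A' :: s) s

-- "".join(translate(movement_calculator(dpad_mapping, a, b)[0])), A's block for a pair
def blockOf (a b : Char) : List Char :=
  translateDirs ((movement_calculator a b).headD [])

def dpadKeys : List Char := ['X', '^', 'A', '<', 'v', '>']

def pairTable : List (Char × Char) :=
  dpadKeys.flatMap (fun a => dpadKeys.map (fun b => (a, b)))

lemma blockOf_struct (a b : Char) :
    ∃ w, blockOf a b = w ++ ['A'] ∧ ∀ c ∈ w, c ∈ ['^', 'v', '<', '>'] := by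
  refine ⟨(((movement_calculator a b).headD []).map (fun d =>
    if d.1 = 0 ∧ d.2 = 0 then []
    else if d.1 = 0 then List.replicate d.2.natAbs (if d.2 > 0 then '^' else 'v')
    else List.replicate d.1.natAbs (if d.1 > 0 then '>' else '<'))).flatten, rfl, ?_⟩
  intro c hc
  rw [List.mem_flatten] at hc
  obtain ⟨l, hl, hcl⟩ := hc
  rw [List.mem_map] at hl
  obtain ⟨d, _, rfl⟩ := hl
  split_ifs at hcl with h1 h2 h3 h4
  · cases hcl
  all_goals
    rw [List.eq_of_mem_replicate hcl]
  all_goals simp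

lemma blockOf_chars (a b : Char) : ∀ c ∈ blockOf a b, c ∈ dpadKeys := by
  obtain ⟨w, hw, hwc⟩ := blockOf_struct a b
  intro c hc
  rw [hw, List.mem_append] at hc
  rcases hc with hc | hc
  · have := hwc c hc
    simp only [dpadKeys]
    simp at this ⊢
    tauto
  · simp at hc
    simp [hc, dpadKeys]

lemma ss_aux (seq : List Char) : ∀ (acc : List Char) (k0 : Char),
    (seq.foldl (fun st c =>
        (st.1 ++ translateDirs ((movement_calculator st.2 c).headD []), c)) (acc, k0)).1
      = acc ++ ((List.zip (k0 :: seq) seq).map (fun ab => blockOf ab.1 ab.2)).flatten := by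
  induction seq with
  | nil => intro acc k0; simp
  | cons c rest ih =>
    intro acc k0
    rw [List.foldl_cons]
    rw [ih (acc ++ translateDirs ((movement_calculator k0 c).headD [])) c]
    simp [blockOf]

lemma single_sequence_eq (seq : List Char) :
    single_sequence seq = ((pairsOf seq).map (fun ab => blockOf ab.1 ab.2)).flatten := by
  unfold single_sequence pairsOf
  rw [ss_aux seq [] 'A']
  rfl

lemma splitGo_noA (l : List Char) (hA : 'A' ∉ l) : ∀ acc, splitGo l acc = [] := by
  induction l with
  | nil => intro acc; rfl
  | cons c rest ih =>
    intro acc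
    have hc : c ≠ 'A' := fun e => hA (e ▸ List.mem_cons_self)
    rw [splitGo, if_neg hc]
    exact ih (fun h => hA (List.mem_cons_of_mem _ h)) _

lemma splitGo_block (w : List Char) (hw : ∀ c ∈ w, c ≠ 'A') :
    ∀ (rest acc : List Char),
      splitGo (w ++ 'A' :: rest) acc = (acc ++ w ++ ['A']) :: splitGo rest [] := by
  induction w with
  | nil => intro rest acc; simp [splitGo]
  | cons c cs ih =>
    intro rest acc
    have hc : c ≠ 'A' := hw c List.mem_cons_self
    rw [List.cons_append, splitGo, if_neg hc,
      ih (fun x hx => hw x (List.mem_cons_of_mem _ hx)) rest (acc ++ [c])]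
    simp

lemma splitA_blocks (bs : List (Char × Char)) :
    splitA ((bs.map (fun ab => blockOf ab.1 ab.2)).flatten)
      = bs.map (fun ab => blockOf ab.1 ab.2) := by
  induction bs with
  | nil => rfl
  | cons ab rest ih =>
    obtain ⟨w, hw, hwc⟩ := blockOf_struct ab.1 ab.2
    have hnoA : ∀ c ∈ w, c ≠ 'A' := by
      intro c hc e
      have := hwc c hc
      rw [e] at this
      simp at this
    unfold splitA at ih ⊢
    rw [List.map_cons, List.flatten_cons, hw, List.append_assoc, List.singleton_append,
      splitGo_block w hnoA, ih]
    simp [hw.symm]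

lemma splitA_single (seg : List Char) :
    splitA (single_sequence seg) = (pairsOf seg).map (fun ab => blockOf ab.1 ab.2) := by
  rw [single_sequence_eq, splitA_blocks]

lemma segLen_pairs (seg : List Char) (n : Nat) :
    segLen seg (n+1) = ((pairsOf seg).map (fun ab => segLen (blockOf ab.1 ab.2) n)).sum := by
  show ((splitA (single_sequence seg)).map (fun p => segLen p n)).sum = _
  rw [splitA_single, List.map_map]
  rfl

lemma mem_pairTable (xy : Char × Char) :
    xy ∈ pairTable ↔ xy.1 ∈ dpadKeys ∧ xy.2 ∈ dpadKeys := by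
  constructor
  · intro h
    rw [pairTable, List.mem_flatMap] at h
    obtain ⟨a, ha, h⟩ := h
    rw [List.mem_map] at h
    obtain ⟨b, hb, rfl⟩ := h
    exact ⟨ha, hb⟩
  · rintro ⟨h1, h2⟩
    rw [pairTable, List.mem_flatMap]
    exact ⟨xy.1, h1, List.mem_map.2 ⟨xy.2, h2, rfl⟩⟩

lemma splitGo_chars (l : List Char) :
    ∀ (acc : List Char),
      (∀ i (h : i < l.length), 'A' ∈ l.drop i → l[i] ∈ dpadKeys) →
      (∀ c ∈ acc, c ∈ dpadKeys) →
      ∀ seg ∈ splitGo l acc, ∀ c ∈ seg, c ∈ dpadKeys := by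
  induction l with
  | nil => intro acc _ _ seg hseg; cases hseg
  | cons x rest ih =>
    intro acc hP hacc seg hseg c hc
    have hshift : ∀ i (h : i < rest.length), 'A' ∈ rest.drop i → rest[i] ∈ dpadKeys := by
      intro i h hA
      have := hP (i+1) (by simpa using Nat.succ_lt_succ h) (by simpa using hA)
      simpa using this
    by_cases hx : x = 'A'
    · rw [splitGo, if_pos hx] at hseg
      rcases List.mem_cons.1 hseg with rfl | hseg'
      · rcases List.mem_append.1 hc with h | h
        · exact hacc c h
        · simp at h
          rw [h]; decide
      · exact ih [] hshift (by simp) seg hseg' c hc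
    · rw [splitGo, if_neg hx] at hseg
      by_cases hA : 'A' ∈ rest
      · have hxk : x ∈ dpadKeys := by
          have := hP 0 (by simp) (by simp [hA])
          simpa using this
        refine ih (acc ++ [x]) hshift ?_ seg hseg c hc
        intro d hd
        rcases List.mem_append.1 hd with h | h
        · exact hacc d h
        · simp at h; rw [h]; exact hxk
      · rw [splitGo_noA rest hA] at hseg
        cases hseg

-- ===== B-side: pair-count characterization =====

lemma blockPairsGo_eq (p : Char) (l : List Char) :
    blockPairsGo p l = List.zip (p :: l) l := by
  induction l generalizing p with
  | nil => rfl
  | cons q rest ih => simp [blockPairsGo, ih, List.zip]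

-- the literal BLOCKS table of Source B agrees with A's computed block on every d-pad pair
lemma pairBlock_eq_blockOf : ∀ xy ∈ pairTable, pairBlock xy.1 xy.2 = blockOf xy.1 xy.2 := by
  decide

-- pure specification of Source B's pair recurrence
def pLen (xy : Char × Char) : Nat → Int
  | 0 => 1
  | n+1 => ((pairsOf (pairBlock xy.1 xy.2)).map (fun q => pLen q n)).sum

lemma zip_shift (s : List Char) : ∀ (k : Char) (t : List Char),
    List.zip (k :: (s ++ t)) (s ++ t)
      = List.zip (k :: s) s ++ List.zip (s.getLastD k :: t) t := by
  induction s with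
  | nil => intro k t; rfl
  | cons x xs ih =>
    intro k t
    simp only [List.cons_append, List.zip_cons_cons, ih x, List.getLastD_cons]

lemma pairsOf_length (s : List Char) : (pairsOf s).length = s.length := by
  simp [pairsOf, List.length_zip]

lemma splitGo_ends : ∀ (l acc seg : List Char), seg ∈ splitGo l acc →
    ∃ w, seg = w ++ ['A'] := by
  intro l
  induction l with
  | nil => intro acc seg h; cases h
  | cons c rest ih =>
    intro acc seg h
    by_cases hc : c = 'A'
    · rw [splitGo, if_pos hc] at h
      rcases List.mem_cons.1 h with rfl | h'
      · exact ⟨acc, rfl⟩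
      · exact ih [] seg h'
    · rw [splitGo, if_neg hc] at h
      exact ih (acc ++ [c]) seg h

lemma pairsOf_flatten : ∀ (segs : List (List Char)),
    (∀ seg ∈ segs, ∃ w, seg = w ++ ['A']) →
    pairsOf segs.flatten = (segs.map pairsOf).flatten := by
  intro segs
  induction segs with
  | nil => intro _; rfl
  | cons seg rest ih =>
    intro h
    obtain ⟨w, hw⟩ := h seg List.mem_cons_self
    have hlast : seg.getLastD 'A' = 'A' := by rw [hw]; simp
    show pairsOf (seg ++ rest.flatten) = _
    unfold pairsOf
    rw [zip_shift, hlast]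
    rw [show List.zip ('A' :: rest.flatten) rest.flatten = pairsOf rest.flatten from rfl,
      ih (fun t ht => h t (List.mem_cons_of_mem _ ht))]
    rfl

lemma flatten_splitGo (u : List Char) : ∀ (v acc : List Char), 'A' ∉ v →
    (splitGo (u ++ 'A' :: v) acc).flatten = acc ++ u ++ ['A'] := by
  induction u with
  | nil =>
    intro v acc hv
    simp only [List.nil_append]
    rw [splitGo, if_pos rfl, splitGo_noA v hv]
    simp
  | cons x xs ih =>
    intro v acc hv
    by_cases hx : x = 'A'
    · subst hx
      rw [List.cons_append, splitGo, if_pos rfl, List.flatten_cons, ih v [] hv]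
      simp
    · rw [List.cons_append, splitGo, if_neg hx, ih v (acc ++ [x]) hv]
      simp

-- rfind.go s ['A'] i scans positions i, i-1, …, 0 for a prefix match
lemma prefixOfA (l : List Char) :
    (['A'].isPrefixOf l) = true ↔ ∃ t, l = 'A' :: t := by
  cases l with
  | nil => simp [List.isPrefixOf]
  | cons x t =>
    simp only [List.isPrefixOf, Bool.and_true, beq_iff_eq]
    constructor
    · intro h; exact ⟨t, by rw [h]⟩
    · rintro ⟨t', ht⟩; cases ht; rfl

lemma rfind_go_noA (cs : List Char) (h : 'A' ∉ cs) :
    ∀ i, PySem.Chars.rfind.go cs ['A'] i = -1 := by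
  intro i
  induction i with
  | zero =>
    rw [PySem.Chars.rfind.go]
    rw [if_neg]
    intro hp
    obtain ⟨t, ht⟩ := (prefixOfA cs).1 hp
    exact h (ht ▸ List.mem_cons_self)
  | succ j ihj =>
    rw [PySem.Chars.rfind.go]
    rw [if_neg, ihj]
    intro hp
    obtain ⟨t, ht⟩ := (prefixOfA (cs.drop (j+1))).1 hp
    exact h (List.mem_of_mem_drop (ht ▸ List.mem_cons_self))

lemma rfind_noA (cs : List Char) (h : 'A' ∉ cs) :
    PySem.Chars.rfind cs ['A'] = -1 := by
  show PySem.Chars.rfind.go cs ['A'] cs.length = -1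
  exact rfind_go_noA cs h _

lemma rfind_go_last (u v : List Char) (hv : 'A' ∉ v) :
    ∀ i, u.length ≤ i →
      PySem.Chars.rfind.go (u ++ 'A' :: v) ['A'] i = (u.length : Int) := by
  intro i
  induction i with
  | zero =>
    intro hle
    have hu : u = [] := List.eq_nil_of_length_eq_zero (Nat.le_zero.1 hle)
    subst hu
    rw [PySem.Chars.rfind.go, if_pos]
    · rfl
    · exact (prefixOfA _).2 ⟨v, rfl⟩
  | succ j ihj =>
    intro hle
    rcases Nat.eq_or_lt_of_le hle with heq | hlt
    · rw [PySem.Chars.rfind.go, if_pos]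
      · exact_mod_cast congrArg Nat.cast heq.symm
      · rw [show j + 1 = u.length from heq.symm, List.drop_left]
        exact (prefixOfA _).2 ⟨v, rfl⟩
    · rw [PySem.Chars.rfind.go, if_neg, ihj (by omega)]
      intro hp
      obtain ⟨t, ht⟩ := (prefixOfA _).1 hp
      have hA : 'A' ∈ (u ++ 'A' :: v).drop (j+1) := ht ▸ List.mem_cons_self
      have hdr : (u ++ 'A' :: v).drop (j+1) = v.drop (j - u.length) := by
        rw [List.drop_append, List.drop_eq_nil_of_le (by omega), List.nil_append,
          show j + 1 - u.length = (j - u.length) + 1 from by omega, List.drop_succ_cons]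
      rw [hdr] at hA
      exact hv (List.mem_of_mem_drop hA)

lemma rfind_last (u v : List Char) (hv : 'A' ∉ v) :
    PySem.Chars.rfind (u ++ 'A' :: v) ['A'] = (u.length : Int) := by
  show PySem.Chars.rfind.go (u ++ 'A' :: v) ['A'] (u ++ 'A' :: v).length = _
  exact rfind_go_last u v hv _ (by simp)

-- every string decomposes around its LAST 'A' (or has none)
lemma lastA_decomp (cs : List Char) :
    ('A' ∉ cs) ∨ ∃ u v, cs = u ++ 'A' :: v ∧ 'A' ∉ v := by
  induction cs using List.reverseRecOn with
  | nil => exact Or.inl (by simp)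
  | append_singleton xs x ih =>
    by_cases hx : x = 'A'
    · subst hx
      exact Or.inr ⟨xs, [], by simp, by simp⟩
    · rcases ih with h | ⟨u, v, he, hv⟩
      · refine Or.inl ?_
        simp only [List.mem_append, List.mem_singleton]
        rintro (h1 | h1)
        · exact h h1
        · exact hx h1.symm
      · refine Or.inr ⟨u, v ++ [x], by rw [he]; simp, ?_⟩
        simp only [List.mem_append, List.mem_singleton]
        rintro (h1 | h1)
        · exact hv h1
        · exact hx h1.symm

-- the slice up to the last 'A' is exactly the concatenation of split's segments
lemma prefix_eq_flatten (cs : List Char) :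
    PySem.List.slice cs none (some (PySem.Chars.rfind cs ['A'] + 1))
      = (splitA cs).flatten := by
  rcases lastA_decomp cs with h | ⟨u, v, rfl, hv⟩
  · have h0 : PySem.Chars.rfind cs ['A'] + 1 = ((0 : Nat) : Int) := by
      rw [rfind_noA cs h]; norm_num
    rw [h0, PySem.List.slice_to_natCast]
    unfold splitA
    rw [splitGo_noA cs h]
    rfl
  · rw [rfind_last u v hv,
      show ((u.length : Int) + 1) = (((u.length + 1 : Nat)) : Int) from by push_cast; ring,
      PySem.List.slice_to_natCast]
    unfold splitA
    rw [flatten_splitGo u v [] hv]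
    rw [show u ++ 'A' :: v = (u ++ ['A']) ++ v from by simp,
      show u.length + 1 = (u ++ ['A']).length from by simp,
      List.take_left]
    simp

lemma stepP_aux (n : Nat) (l : List ((Char × Char) × Int))
    (ns : PySem.Dict (Char × Char) Int) (h : ns.keys.Nodup) :
    (l.foldl (fun nxt p =>
        (blockPairsGo 'A' (pairBlock p.1.1 p.1.2)).foldl
          (fun nxt2 xy => nxt2.modify xy 0 (· + p.2)) nxt) ns).keys.Nodup ∧
      Wk (fun xy => pLen xy n) (l.foldl (fun nxt p =>
        (blockPairsGo 'A' (pairBlock p.1.1 p.1.2)).foldl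
          (fun nxt2 xy => nxt2.modify xy 0 (· + p.2)) nxt) ns) =
      Wk (fun xy => pLen xy n) ns + (l.map (fun p => pLen p.1 (n+1) * p.2)).sum := by
  induction l generalizing ns with
  | nil => simpa using h
  | cons p ps ih =>
    obtain ⟨hn, he⟩ := Wk_foldl_modify (fun xy => pLen xy n) id (fun _ => p.2)
      (blockPairsGo 'A' (pairBlock p.1.1 p.1.2)) ns h
    simp only [id_eq] at hn he
    obtain ⟨hn', he'⟩ := ih _ hn
    refine ⟨hn', ?_⟩
    simp only [List.foldl_cons, List.map_cons, List.sum_cons]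
    rw [he', he]
    have hb : ((blockPairsGo 'A' (pairBlock p.1.1 p.1.2)).map
        (fun q => pLen q n * p.2)).sum = pLen p.1 (n+1) * p.2 := by
      rw [blockPairsGo_eq, pLen]
      exact List.sum_map_mul_right _ _ _
    rw [hb]
    ring

lemma stepP_spec (n : Nat) (d : PySem.Dict (Char × Char) Int) (h : d.keys.Nodup) :
    (stepP d).keys.Nodup ∧
      Wk (fun xy => pLen xy n) (stepP d) = Wk (fun xy => pLen xy (n+1)) d := by
  obtain ⟨hn, he⟩ := stepP_aux n d.items PySem.Dict.empty (by simp [PySem.Dict.keys_empty])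
  refine ⟨hn, ?_⟩
  unfold stepP
  rw [he]
  have : Wk (fun xy => pLen xy n) PySem.Dict.empty = 0 := by
    simp [Wk, PySem.Dict.keys_empty]
  rw [this, zero_add]
  exact W_eq_Wk (fun xy => pLen xy (n+1)) d h

lemma sum_values_eq (d : PySem.Dict (Char × Char) Int) (h : d.keys.Nodup) :
    (d.items.map (fun p => p.2)).sum = Wk (fun _ => (1 : Int)) d := by
  rw [show (fun p : (Char × Char) × Int => p.2) = (fun p : (Char × Char) × Int =>
      (fun _ : Char × Char => (1 : Int)) p.1 * p.2) from by funext p; simp]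
  exact W_eq_Wk (fun _ => (1 : Int)) d h

lemma calcP_iter (n : Nat) (d : PySem.Dict (Char × Char) Int) (h : d.keys.Nodup) :
    ((stepP^[n] d).items.map (fun p => p.2)).sum = Wk (fun xy => pLen xy n) d := by
  induction n generalizing d with
  | zero =>
    rw [Function.iterate_zero_apply, sum_values_eq d h]
    rfl
  | succ n ih =>
    obtain ⟨hn, he⟩ := stepP_spec n d h
    rw [Function.iterate_succ_apply, ih (stepP d) hn, he]

-- bridge at depth 0: a segment's length is its pair count
lemma bridge0 (seg : List Char) :
    segLen seg 0 = ((pairsOf seg).map (fun xy => pLen xy 0)).sum := by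
  show (seg.length : Int) = _
  have : ∀ xy : Char × Char, pLen xy 0 = 1 := fun _ => rfl
  rw [List.map_congr_left (fun xy _ => this xy), List.map_const', List.sum_replicate,
    pairsOf_length]
  simp

-- bridge: on segments over the d-pad keys, A's segment recurrence equals
-- the sum of Source B's pair recurrence over the segment's pairs
lemma bridge (n : Nat) : ∀ (seg : List Char), (∀ c ∈ seg, c ∈ dpadKeys) →
    segLen seg n = ((pairsOf seg).map (fun xy => pLen xy n)).sum := by
  induction n with
  | zero => intro seg _; exact bridge0 seg
  | succ n ih =>
    intro seg hseg
    have hmem : ∀ ab ∈ pairsOf seg, ab ∈ pairTable := by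
      intro ab hab
      obtain ⟨h1, h2⟩ := List.of_mem_zip hab
      rw [mem_pairTable]
      refine ⟨?_, hseg _ h2⟩
      rcases List.mem_cons.1 h1 with e | h1'
      · rw [e]; decide
      · exact hseg _ h1'
    rw [segLen_pairs]
    refine congrArg List.sum (List.map_congr_left ?_)
    intro ab hab
    rw [ih (blockOf ab.1 ab.2) (blockOf_chars ab.1 ab.2)]
    show _ = pLen ab (n+1)
    rw [pLen, pairBlock_eq_blockOf ab (hmem ab hab)]

lemma alt_eq_iter (s : String) (c : Int) (hc : ¬ c ≤ 0) :
    find_dpad_seq_alt s c =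
      ((stepP^[c.toNat] (PySem.Dict.counter
        (pairsOf (PySem.List.slice s.toList none
          (some (PySem.Chars.rfind s.toList ['A'] + 1)))))).items.map
        (fun p => p.2)).sum := by
  show (if c ≤ 0 then PySem.Chars.rfind s.toList ['A'] + 1 else _) = _
  rw [if_neg hc, foldl_const_iterate, PySem.List.length_pyRange_one]
  norm_num
  rfl

lemma sum_cast_lengths (l : List (List Char)) :
    (l.map (fun seg => (seg.length : Int))).sum = ((l.map List.length).sum : Int) := by
  induction l with
  | nil => rfl
  | cons x xs ih => simp [ih]

-- at depth 0 the answer is the length of the prefix up to the last 'A'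
lemma lenA (cs : List Char) :
    ((splitA cs).map (fun seg => (seg.length : Int))).sum
      = PySem.Chars.rfind cs ['A'] + 1 := by
  rcases lastA_decomp cs with h | ⟨u, v, rfl, hv⟩
  · rw [rfind_noA cs h]
    unfold splitA
    rw [splitGo_noA cs h]
    rfl
  · rw [rfind_last u v hv, sum_cast_lengths, ← List.length_flatten]
    unfold splitA
    rw [flatten_splitGo u v [] hv]
    simp

-- ===== VERDICT (by name: the statement is the Claim_ definition above) =====
theorem find_dpad_seq_spec : Claim_equal_find_dpad_seq := by
  intro s c _ hpre
  show find_dpad_seq s c = find_dpad_seq_alt s c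
  have hnd : (split_sequence s.toList).keys.Nodup :=
    PySem.Dict.nodup_keys_counter (splitA s.toList)
  by_cases hc : c ≤ 0
  · have h0 : c.toNat = 0 := by omega
    rw [find_eq_iter, calc_iter c.toNat _ hnd, h0]
    show Wk (fun t => segLen t 0) (PySem.Dict.counter (splitA s.toList))
        = if c ≤ 0 then PySem.Chars.rfind s.toList ['A'] + 1 else _
    rw [if_pos hc, counter_Wk, ← lenA s.toList]
    rfl
  · rw [find_eq_iter, calc_iter c.toNat _ hnd, alt_eq_iter s c hc,
      calcP_iter c.toNat _ (PySem.Dict.nodup_keys_counter _), counter_Wk,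
      prefix_eq_flatten s.toList,
      pairsOf_flatten (splitA s.toList) (fun seg h => splitGo_ends s.toList [] seg h),
      List.map_flatten, List.sum_flatten, List.map_map, List.map_map]
    show Wk (fun t => segLen t c.toNat) (PySem.Dict.counter (splitA s.toList)) = _
    rw [counter_Wk]
    refine congrArg List.sum (List.map_congr_left ?_)
    intro seg hseg
    show segLen seg c.toNat = ((pairsOf seg).map (fun xy => pLen xy c.toNat)).sum
    have hP : ∀ d ∈ seg, d ∈ dpadKeys := by
      rcases hpre with h | h
      · exact absurd h hc
      · refine splitGo_chars s.toList [] ?_ (by simp) seg hseg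
        intro i hi hA
        have := h i hi hA
        simp only [dpadKeys]
        rcases this with e | e | e | e | e | e <;> simp [e]
    exact bridge c.toNat seg hP
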